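-- pv_equiv track=rewrite | github.com/aluramh/DailyCodingProblems | DynamicProgramming/how_sum.py | how_sum_recursive
-- ===== SOURCE A (Python) =====
-- def how_sum_recursive(target_sum, numbers):
--     def helper(target_sum):
--         # We return an empty array because by "not choosing a number" we can always "add up" to 0
--         if target_sum == 0:
--             return []
--         # Only positive numbers are valid, so we cannot "add up" to negative numbers
--         if target_sum < 0:
--             return None
--
--         for num in numbers:
--             # Get back the array of the recursive call that adds up to target_sum
--             result = helper(target_sum - num)
--
--             # If the result is not none, it is a valid array, so return it and end the loop
--             if result is not None:
--                 # Return the array of the result + the number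
--                 return [num] + result
--
--         # We looped through everything and there is no value. Return.
--         return None
--
--     return helper(target_sum)
-- ===== SOURCE B (Python) =====
-- def how_sum_recursive(target_sum, numbers):
--     # Bottom-up DP: table of parent pointers over 0..target_sum, then reconstruct the chain.
--     if target_sum == 0:
--         return []
--     if target_sum < 0:
--         return None
--     parent = {0: None}
--     for t in range(1, target_sum + 1):
--         for num in numbers:
--             if (t - num) in parent:
--                 parent[t] = num
--                 break
--     if target_sum not in parent:
--         return None
--     out = []
--     t = target_sum
--     while t != 0:
--         num = parent[t]
--         out.append(num)
--         t -= num
--     return out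
-- ===== Notes on version B (the rewrite author's own statement) =====
-- stated objective: faster
-- what changed: Replaced the exponential blind recursion with a bottom-up parent-pointer DP table over 0..target_sum plus chain reconstruction, filling each value once.
-- outside the precondition, e.g. on how_sum_recursive(2, [3, -1]): A returns [-1, 3], B returns None; on how_sum_recursive(1, [0]): A raises RecursionError, B returns None; on how_sum_recursive(5, [5, 0]): A returns [5], B returns [5]
import Mathlib
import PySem

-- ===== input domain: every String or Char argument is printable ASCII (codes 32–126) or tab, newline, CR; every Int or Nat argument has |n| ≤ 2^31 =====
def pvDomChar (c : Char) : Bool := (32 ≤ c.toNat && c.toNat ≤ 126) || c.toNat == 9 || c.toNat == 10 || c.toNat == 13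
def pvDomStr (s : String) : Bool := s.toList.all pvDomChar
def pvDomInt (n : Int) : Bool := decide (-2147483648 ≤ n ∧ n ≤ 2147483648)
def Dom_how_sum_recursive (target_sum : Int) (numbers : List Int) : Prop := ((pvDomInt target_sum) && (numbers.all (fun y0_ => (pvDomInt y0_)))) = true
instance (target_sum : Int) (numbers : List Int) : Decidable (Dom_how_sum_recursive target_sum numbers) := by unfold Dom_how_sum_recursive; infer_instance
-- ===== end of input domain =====

-- B replaces A's exponential blind recursion by a bottom-up parent-pointer DP table over
-- 0..target_sum followed by chain reconstruction (objective: faster).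

-- ===== PORT A =====
-- A's inner 'helper' recursion; Python recursion depth is modelled by a fuel
-- argument (fuel 0 is never reached on inputs satisfying Pre_).
def pvHelperA (numbers : List Int) : Nat → Int → Option (List Int)
  | 0, _ => none
  | fuel + 1, t =>
    if t = 0 then some []
    else if t < 0 then none
    else numbers.findSome? (fun num => (pvHelperA numbers fuel (t - num)).map (fun r => num :: r))

def how_sum_recursive (target_sum : Int) (numbers : List Int) : Option (List Int) :=
  pvHelperA numbers (target_sum.toNat + 1) target_sum

-- ===== PORT B =====
-- one iteration of B's 'for t in range(1, target_sum+1)' body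
def pvStepB (numbers : List Int) (parent : PySem.Dict Int (Option Int)) (t : Int) : PySem.Dict Int (Option Int) :=
  match numbers.find? (fun num => parent.contains (t - num)) with
  | some num => parent.insert t (some num)
  | none => parent

-- B's 'while t != 0' reconstruction loop; fuel bounds the chain length (the stored
-- parent pointers strictly decrease t, so fuel target_sum.toNat + 1 is never exhausted)
def pvRebuild (parent : PySem.Dict Int (Option Int)) : Nat → Int → List Int → List Int
  | 0, _, out => out
  | fuel + 1, t, out =>
    if t = 0 then out
    else
      match parent.getD t none with
      | some num => pvRebuild parent fuel (t - num) (out ++ [num])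
      | none => out

def how_sum_recursive_alt (target_sum : Int) (numbers : List Int) : Option (List Int) :=
  if target_sum = 0 then some []
  else if target_sum < 0 then none
  else
    let parent := (PySem.List.pyRange 1 (target_sum + 1) 1).foldl (pvStepB numbers)
      ((PySem.Dict.empty).insert 0 none)
    if parent.contains target_sum = false then none
    else some (pvRebuild parent (target_sum.toNat + 1) target_sum [])

-- ===== PRECONDITION & SPEC =====
-- Pre_ excludes positive targets together with a list containing a non-positive number: there A's
-- unbounded recursion can fail to terminate (RecursionError) or return a chain that uses a
-- non-positive number, which B's bottom-up table over 0..target_sum never considers (on some such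
-- inputs A happens to terminate with B's value, but A's termination there has no closed form).
def Pre_how_sum_recursive (target_sum : Int) (numbers : List Int) : Prop :=
  target_sum ≤ 0 ∨ ∀ n ∈ numbers, 0 < n
instance (target_sum : Int) (numbers : List Int) : Decidable (Pre_how_sum_recursive target_sum numbers) := by unfold Pre_how_sum_recursive; infer_instance

def pvWitness_how_sum_recursive : Int × List Int := (7, [2, 3])

def Spec_how_sum_recursive (target_sum : Int) (numbers : List Int) (out : Option (List Int)) : Prop := out = how_sum_recursive_alt target_sum numbers
instance (target_sum : Int) (numbers : List Int) (out : Option (List Int)) : Decidable (Spec_how_sum_recursive target_sum numbers out) := by unfold Spec_how_sum_recursive; infer_instance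

-- ===== CLAIM (what is proved, stated in full; the proofs are below) =====
def Claim_equal_how_sum_recursive : Prop := ∀ (target_sum : Int) (numbers : List Int), Dom_how_sum_recursive target_sum numbers → Pre_how_sum_recursive target_sum numbers → Spec_how_sum_recursive target_sum numbers (how_sum_recursive target_sum numbers)

-- ===== LEMMAS AND PROOFS =====

theorem findSome?_congr_mem {α β : Type} {l : List α} {f g : α → Option β}
    (h : ∀ a ∈ l, f a = g a) : l.findSome? f = l.findSome? g := by
  induction l with
  | nil => rfl
  | cons x xs ih =>
    simp only [List.findSome?_cons, h x (by simp)]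
    cases g x with
    | none => exact ih (fun a ha => h a (by simp [ha]))
    | some v => rfl

theorem find?_congr_mem {α : Type} {l : List α} {p q : α → Bool}
    (h : ∀ a ∈ l, p a = q a) : l.find? p = l.find? q := by
  induction l with
  | nil => rfl
  | cons x xs ih =>
    simp only [List.find?_cons, h x (by simp)]
    cases q x
    · exact ih (fun a ha => h a (by simp [ha]))
    · rfl

-- a findSome? over mapped options is determined by the find? of the isSome test
theorem findSome?_map_eq_find? {α β γ : Type} (l : List α) (g : α → Option β) (h : α → β → γ) :
    l.findSome? (fun a => (g a).map (h a)) =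
      match l.find? (fun a => (g a).isSome) with
      | none => none
      | some a => (g a).map (h a) := by
  induction l with
  | nil => rfl
  | cons x xs ih =>
    simp only [List.findSome?_cons, List.find?_cons]
    cases hx : g x with
    | none => simpa [hx] using ih
    | some v => simp [hx]

-- with all numbers positive, pvHelperA is fuel-independent once fuel ≥ t.toNat + 1
theorem pvHelperA_fuel (numbers : List Int) (hp : ∀ n ∈ numbers, 0 < n) :
    ∀ (f g : Nat) (t : Int), t.toNat + 1 ≤ f → t.toNat + 1 ≤ g →
      pvHelperA numbers f t = pvHelperA numbers g t := by
  intro f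
  induction f with
  | zero => intro g t hf; omega
  | succ f ih =>
    intro g t hf hg
    cases g with
    | zero => omega
    | succ g =>
      simp only [pvHelperA]
      by_cases h0 : t = 0
      · simp [h0]
      · by_cases hneg : t < 0
        · simp [h0, hneg]
        · simp only [h0, hneg, if_false]
          apply findSome?_congr_mem
          intro num hnum
          have hpos := hp num hnum
          rw [ih g (t - num) (by omega) (by omega)]

-- the value A's helper computes at t (its recursion depth never exceeds t.toNat + 1)
def pvH (numbers : List Int) (t : Int) : Option (List Int) :=
  pvHelperA numbers (t.toNat + 1) t

-- B's chosen parent pointer at j: the first number whose predecessor is solvable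
def pvChoice (numbers : List Int) (j : Int) : Option Int :=
  numbers.find? (fun num => (pvH numbers (j - num)).isSome)

theorem pvH_neg (numbers : List Int) (t : Int) (h : t < 0) : pvH numbers t = none := by
  have : t.toNat = 0 := by omega
  simp [pvH, pvHelperA, h, show t ≠ 0 by omega]

theorem pvH_zero (numbers : List Int) : pvH numbers 0 = some [] := by
  simp [pvH, pvHelperA]

theorem pvHelperA_succ (numbers : List Int) (fuel : Nat) (t : Int) :
    pvHelperA numbers (fuel + 1) t =
      if t = 0 then some []
      else if t < 0 then none
      else numbers.findSome? (fun num => (pvHelperA numbers fuel (t - num)).map (fun r => num :: r)) :=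
  rfl

theorem pvH_char (numbers : List Int) (hp : ∀ n ∈ numbers, 0 < n) (j : Int) (hj : 0 < j) :
    pvH numbers j =
      match pvChoice numbers j with
      | none => none
      | some num => (pvH numbers (j - num)).map (fun r => num :: r) := by
  have h1 : pvH numbers j = numbers.findSome? (fun num =>
      (pvH numbers (j - num)).map (fun r => num :: r)) := by
    rw [pvH, pvHelperA_succ, if_neg (show ¬ j = 0 by omega), if_neg (show ¬ j < 0 by omega)]
    apply findSome?_congr_mem
    intro num hnum
    have hpos := hp num hnum
    rw [show pvHelperA numbers j.toNat (j - num) = pvH numbers (j - num) from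
      pvHelperA_fuel numbers hp j.toNat ((j - num).toNat + 1) (j - num) (by omega) le_rfl]
  rw [h1, findSome?_map_eq_find? numbers (fun num => pvH numbers (j - num)) (fun num r => num :: r)]
  unfold pvChoice
  cases List.find? (fun num => (pvH numbers (j - num)).isSome) numbers <;> rfl

theorem pvChoice_isSome (numbers : List Int) (hp : ∀ n ∈ numbers, 0 < n) (j : Int) (hj : 0 < j) :
    (pvChoice numbers j).isSome = (pvH numbers j).isSome := by
  rw [pvH_char numbers hp j hj]
  cases hch : pvChoice numbers j with
  | none => rfl
  | some num =>
    have := List.find?_some hch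
    simp only [Option.isSome_map]
    simp [this]

-- the DP-table invariant: after processing 1..m, the table holds 0 and exactly the
-- solvable j in 1..m, each mapped to its pvChoice parent pointer
theorem pvTable_inv (numbers : List Int) (hp : ∀ n ∈ numbers, 0 < n) :
    ∀ (m : Nat) (j : Int),
      ((PySem.List.pyRange 1 ((m : Int) + 1) 1).foldl (pvStepB numbers)
        ((PySem.Dict.empty).insert 0 none)).get? j
      = if j = 0 then some none
        else if 0 < j ∧ j ≤ (m : Int) then (pvChoice numbers j).map some
        else none := by
  intro m
  induction m with
  | zero =>
    intro j
    rw [PySem.List.pyRange_one_eq_nil (by omega)]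
    simp only [List.foldl_nil]
    rw [PySem.Dict.get?_insert]
    by_cases hj : j = 0
    · simp [hj]
    · simp only [hj, if_false]
      rw [if_neg (by omega), PySem.Dict.get?_empty]
  | succ m ih =>
    intro j
    have hsplit : PySem.List.pyRange 1 ((m : Int) + 1 + 1) 1
        = PySem.List.pyRange 1 ((m : Int) + 1) 1 ++ [(m : Int) + 1] := by
      exact_mod_cast PySem.List.pyRange_one_succ_right (a := 1) (b := (m : Int) + 1) (by omega)
    rw [show ((m + 1 : Nat) : Int) + 1 = (m : Int) + 1 + 1 by push_cast; ring, hsplit,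
      List.foldl_append]
    simp only [List.foldl_cons, List.foldl_nil, pvStepB]
    -- the membership scan over numbers computes exactly pvChoice ((m:Int)+1)
    have hscan : numbers.find? (fun num =>
        ((PySem.List.pyRange 1 ((m : Int) + 1) 1).foldl (pvStepB numbers)
          ((PySem.Dict.empty).insert 0 none)).contains ((m : Int) + 1 - num))
        = pvChoice numbers ((m : Int) + 1) := by
      apply find?_congr_mem
      intro num hnum
      have hpos := hp num hnum
      rw [PySem.Dict.contains_eq_isSome_get?, ih ((m : Int) + 1 - num)]
      by_cases h0 : (m : Int) + 1 - num = 0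
      · rw [if_pos h0, h0, pvH_zero]
        rfl
      · rw [if_neg h0]
        by_cases hc : 0 < (m : Int) + 1 - num
        · rw [if_pos ⟨hc, by omega⟩, Option.isSome_map,
            pvChoice_isSome numbers hp ((m : Int) + 1 - num) hc]
        · rw [if_neg (by omega), pvH_neg numbers ((m : Int) + 1 - num) (by omega)]
          rfl
    rw [hscan]
    cases hch : pvChoice numbers ((m : Int) + 1) with
    | some num =>
      rw [PySem.Dict.get?_insert]
      by_cases hj : j = (m : Int) + 1
      · subst hj
        rw [if_pos rfl, if_neg (by omega), if_pos (by push_cast; omega), hch]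
        rfl
      · rw [if_neg hj, ih j]
        by_cases h0 : j = 0
        · simp [h0]
        · rw [if_neg h0, if_neg h0]
          by_cases hc : 0 < j ∧ j ≤ (m : Int)
          · rw [if_pos hc, if_pos (by push_cast; omega)]
          · rw [if_neg hc, if_neg (by push_cast; omega)]
    | none =>
      rw [ih j]
      by_cases hj : j = (m : Int) + 1
      · subst hj
        rw [if_neg (by omega), if_neg (by omega), if_neg (by omega),
          if_pos (by push_cast; omega), hch]
        rfl
      · by_cases h0 : j = 0
        · simp [h0]
        · rw [if_neg h0, if_neg h0]
          by_cases hc : 0 < j ∧ j ≤ (m : Int)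
          · rw [if_pos hc, if_pos (by push_cast; omega)]
          · rw [if_neg hc, if_neg (by push_cast; omega)]

-- reconstruction walks the parent pointers and rebuilds exactly A's list
theorem pvRebuild_eq (numbers : List Int) (hp : ∀ n ∈ numbers, 0 < n) (M : Nat) :
    ∀ (n : Nat) (j : Int) (out l : List Int), j.toNat + 1 ≤ n → 0 ≤ j → j ≤ (M : Int) →
      pvH numbers j = some l →
      pvRebuild ((PySem.List.pyRange 1 ((M : Int) + 1) 1).foldl (pvStepB numbers)
        ((PySem.Dict.empty).insert 0 none)) n j out = out ++ l := by
  intro n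
  induction n with
  | zero => intro j out l hn; omega
  | succ n ih =>
    intro j out l hn h0 hM hl
    by_cases hj : j = 0
    · subst hj
      rw [pvH_zero] at hl
      simp only [pvRebuild]
      simp [← Option.some_inj.mp hl]
    · have hjpos : 0 < j := by omega
      have hchar := pvH_char numbers hp j hjpos
      rw [hl] at hchar
      cases hch : pvChoice numbers j with
      | none =>
        simp only [hch] at hchar
        simp at hchar
      | some num =>
        simp only [hch] at hchar
        have hnum : num ∈ numbers := List.mem_of_find?_eq_some hch
        have hpos := hp num hnum
        cases hprev : pvH numbers (j - num) with
        | none =>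
          simp only [hprev, Option.map_none] at hchar
          simp at hchar
        | some l' =>
          rw [hprev] at hchar
          have hll : l = num :: l' := by simpa using hchar
          have hget : ((PySem.List.pyRange 1 ((M : Int) + 1) 1).foldl (pvStepB numbers)
              ((PySem.Dict.empty).insert 0 none)).getD j none = some num := by
            rw [PySem.Dict.getD_eq_get?_getD, pvTable_inv numbers hp M j,
              if_neg hj, if_pos ⟨hjpos, hM⟩, hch]
            rfl
          simp only [pvRebuild, if_neg hj, hget]
          have hprev0 : 0 ≤ j - num := by
            by_contra hc
            rw [pvH_neg numbers (j - num) (by omega)] at hprev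
            exact absurd hprev (by simp)
          rw [ih (j - num) (out ++ [num]) l' (by omega) hprev0 (by omega) hprev]
          simp [hll]

-- ===== VERDICT (by name: the statement is the Claim_ definition above) =====
theorem how_sum_recursive_spec : Claim_equal_how_sum_recursive := by
  intro t numbers _ hpre
  unfold Spec_how_sum_recursive how_sum_recursive how_sum_recursive_alt
  by_cases h0 : t = 0
  · simp [h0, pvHelperA]
  · by_cases hneg : t < 0
    · have : t.toNat = 0 := by omega
      simp [hneg, h0, pvHelperA]
    · have hp : ∀ n ∈ numbers, 0 < n := by
        cases hpre with
        | inl h => omega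
        | inr h => exact h
      rw [if_neg h0, if_neg hneg]
      have hcast : t = ((t.toNat : Int)) := by omega
      have htpos : 0 < t := by omega
      have hcont : ((PySem.List.pyRange 1 (t + 1) 1).foldl (pvStepB numbers)
          ((PySem.Dict.empty).insert 0 none)).contains t = (pvH numbers t).isSome := by
        rw [PySem.Dict.contains_eq_isSome_get?]
        rw [show t + 1 = ((t.toNat : Int) + 1) by omega]
        rw [pvTable_inv numbers hp t.toNat t, if_neg h0, if_pos ⟨htpos, by omega⟩,
          Option.isSome_map, pvChoice_isSome numbers hp t htpos]
      simp only [hcont]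
      cases hv : pvH numbers t with
      | none =>
        simp only [Option.isSome_none]
        simpa [pvH] using hv
      | some l =>
        simp only [Option.isSome_some, Bool.true_eq_false, if_false]
        have hreb := pvRebuild_eq numbers hp t.toNat (t.toNat + 1) t [] l
          (by omega) (by omega) (by omega) hv
        rw [show t + 1 = ((t.toNat : Int) + 1) by omega, hreb]
        simpa [pvH] using hv
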